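-- pv_equiv track=rewrite | github.com/ElleryAree/adventofcode | advent23/13_mirrors.py | check_horizontal_middle
-- ===== SOURCE A (Python) =====
-- def check_horizontal_middle(grid, middle):
--     for step in range(middle + 1):
--         if middle - step < 0 or middle + step + 1 >= len(grid):
--             break
--
--         line = grid[middle - step]
--         other = grid[middle + step + 1]
--
--         for i in range(len(line)):
--             if line[i] != other[i]:
--                 return False
--
--     return True
-- ===== SOURCE B (Python) =====
-- def check_horizontal_middle(grid, middle):
--     if middle < 0:
--         return True
--     k = min(middle + 1, len(grid) - middle - 1)
--     window = grid[middle + 1 - k : middle + 1 + k]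
--     return window == window[::-1]
-- ===== Notes on version B (the rewrite author's own statement) =====
-- stated objective: simpler
-- what changed: Replaces A's outward step loop comparing mirrored row pairs character by character with extracting the symmetric reflection window around the mirror and testing it for palindromicity via one list equality window == window[::-1].
-- outside the precondition, e.g. on check_horizontal_middle(['a', 'ab'], 0): A returns True, B returns False; on check_horizontal_middle(['ab', 'a'], 0): A raises IndexError, B returns False
import Mathlib
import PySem

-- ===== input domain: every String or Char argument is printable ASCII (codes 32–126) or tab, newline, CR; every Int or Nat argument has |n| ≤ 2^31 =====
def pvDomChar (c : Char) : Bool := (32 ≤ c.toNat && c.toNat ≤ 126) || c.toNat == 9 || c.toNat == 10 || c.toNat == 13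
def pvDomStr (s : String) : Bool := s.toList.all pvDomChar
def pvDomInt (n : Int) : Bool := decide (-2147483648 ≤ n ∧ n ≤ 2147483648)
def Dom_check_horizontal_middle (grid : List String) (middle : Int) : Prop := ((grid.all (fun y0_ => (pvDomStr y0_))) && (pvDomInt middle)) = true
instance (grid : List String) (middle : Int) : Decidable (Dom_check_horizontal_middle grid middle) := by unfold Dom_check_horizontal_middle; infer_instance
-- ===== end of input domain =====

-- B replaces A's outward pairwise scan by extracting the symmetric reflection window around the
-- mirror and testing it for palindromicity as one list equality (simpler decomposition, same cost).
-- Pre_ excludes ragged reflection windows with a prefix-related mirrored pair; there A raises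
-- IndexError or its prefix-bounded scan accepts rows of unequal length.

-- ===== PORT A =====
-- inner loop: "for i in range(len(line)): if line[i] != other[i]: return False"
-- (other[i] with i out of range is Python's IndexError; such inputs are outside Pre_,
--  there the port reads a default ' ' instead)
def chmInnerA (ln oth : List Char) (i : Nat) : Bool :=
  if h : i < ln.length then
    if ln[i] ≠ oth.getD i ' ' then false else chmInnerA ln oth (i + 1)
  else true
termination_by ln.length - i

-- outer loop: "for step in range(middle + 1): …" with the break / early return
def chmOuterA (grid : List String) (middle : Int) (step fuel : Nat) : Bool :=
  match fuel with
  | 0 => true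
  | Nat.succ f =>
    if middle - step < 0 ∨ (grid.length : Int) ≤ middle + step + 1 then true
    else
      let ln := ((PySem.List.pyGet? grid (middle - step)).getD "").toList
      let oth := ((PySem.List.pyGet? grid (middle + step + 1)).getD "").toList
      if chmInnerA ln oth 0 then chmOuterA grid middle (step + 1) f else false

def check_horizontal_middle (grid : List String) (middle : Int) : Bool :=
  chmOuterA grid middle 0 (middle + 1).toNat

-- ===== PORT B =====
-- if middle < 0: return True
-- k = min(middle+1, len(grid)-middle-1); window = grid[middle+1-k : middle+1+k]
-- return window == window[::-1]
def check_horizontal_middle_alt (grid : List String) (middle : Int) : Bool :=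
  if middle < 0 then true
  else
    let k := min (middle + 1) ((grid.length : Int) - middle - 1)
    let window := PySem.List.slice grid (some (middle + 1 - k)) (some (middle + 1 + k))
    window == window.reverse

-- ===== PRECONDITION & SPEC =====
-- Pre_ excludes ragged reflection windows in which some mirrored pair of rows agrees on its
-- common-length prefix but differs in length: there A raises IndexError (lower row shorter) or
-- compares only up to the upper row's length, and on such non-rectangular grids A's prefix
-- comparison and B's whole-row equality are both defensible readings of an unspecified corner.
def Pre_check_horizontal_middle (grid : List String) (middle : Int) : Prop :=
  ∀ step : Nat, step < grid.length → (step : Int) ≤ middle → middle + step + 1 < (grid.length : Int) →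
    ¬ ((grid.getD (middle - step).toNat "").toList.length
          ≠ (grid.getD (middle + step + 1).toNat "").toList.length ∧
        (grid.getD (middle - step).toNat "").toList.take
            (min (grid.getD (middle - step).toNat "").toList.length
                 (grid.getD (middle + step + 1).toNat "").toList.length)
          = (grid.getD (middle + step + 1).toNat "").toList.take
            (min (grid.getD (middle - step).toNat "").toList.length
                 (grid.getD (middle + step + 1).toNat "").toList.length))
instance (grid : List String) (middle : Int) : Decidable (Pre_check_horizontal_middle grid middle) := by
  unfold Pre_check_horizontal_middle; infer_instance

def pvWitness_check_horizontal_middle : List String × Int := (["#.#", "..#", "..#", "#.#"], 1)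

def Spec_check_horizontal_middle (grid : List String) (middle : Int) (out : Bool) : Prop := out = check_horizontal_middle_alt grid middle
instance (grid : List String) (middle : Int) (out : Bool) : Decidable (Spec_check_horizontal_middle grid middle out) := by unfold Spec_check_horizontal_middle; infer_instance

-- ===== CLAIM (what is proved, stated in full; the proofs are below) =====
def Claim_equal_check_horizontal_middle : Prop := ∀ (grid : List String) (middle : Int), Dom_check_horizontal_middle grid middle → Pre_check_horizontal_middle grid middle → Spec_check_horizontal_middle grid middle (check_horizontal_middle grid middle)

-- ===== LEMMAS AND PROOFS =====

-- chmInnerA is the bounded ∀ it scans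
theorem chmInnerA_eq_true_iff (ln oth : List Char) (i : Nat) :
    chmInnerA ln oth i = true ↔
      ∀ j, i ≤ j → (hj : j < ln.length) → ln[j] = oth.getD j ' ' := by
  fun_induction chmInnerA ln oth i with
  | case1 i h hne =>
    simp only [Bool.false_eq_true, false_iff]
    push Not
    exact ⟨i, le_refl i, h, hne⟩
  | case2 i h heq ih =>
    rw [ih]
    constructor
    · intro H j hij hj
      rcases Nat.eq_or_lt_of_le hij with rfl | hlt
      · exact not_ne_iff.mp heq
      · exact H j hlt hj
    · intro H j hij hj
      exact H j (Nat.le_of_succ_le hij) hj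
  | case3 i h =>
    simp only [true_iff]
    intro j hij hj; omega

-- under Pre_'s per-pair condition the inner scan is exactly list equality
theorem chmInnerA_eq_decide (l o : List Char)
    (h : ¬ (l.length ≠ o.length ∧
            l.take (min l.length o.length) = o.take (min l.length o.length))) :
    chmInnerA l o 0 = decide (l = o) := by
  rw [Bool.eq_iff_iff, chmInnerA_eq_true_iff, decide_eq_true_iff]
  constructor
  · intro H
    have htake : l.take (min l.length o.length) = o.take (min l.length o.length) := by
      apply List.ext_getElem (by simp)
      intro j hj hj'
      have hjl : j < l.length := by simp at hj; omega
      have hjo : j < o.length := by simp at hj; omega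
      rw [List.getElem_take, List.getElem_take, H j (Nat.zero_le j) hjl,
          List.getD_eq_getElem o ' ' hjo]
    have hlen : l.length = o.length := by
      by_contra hne
      exact h ⟨hne, htake⟩
    apply List.ext_getElem hlen
    intro j hj hj'
    rw [H j (Nat.zero_le j) hj, List.getD_eq_getElem o ' ' hj']
  · intro H j _ hj
    subst H
    rw [List.getD_eq_getElem l ' ' hj]

-- the outer loop from step on checks pairwise equality along the zipped halves
theorem outer_eq_zip (grid : List String) (m : Nat)
    (hPre : Pre_check_horizontal_middle grid (m : Int)) :
    ∀ fuel step : Nat, step + fuel = m + 1 →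
      chmOuterA grid (m : Int) step fuel =
        ((((grid.take (m + 1)).reverse).zip (grid.drop (m + 1))).drop step).all
          (fun p => p.1 == p.2) := by
  intro fuel
  induction fuel with
  | zero =>
    intro step hs
    have hstep : step = m + 1 := by omega
    rw [chmOuterA]
    rw [List.drop_eq_nil_of_le]
    · simp
    · calc (((grid.take (m + 1)).reverse).zip (grid.drop (m + 1))).length
          ≤ ((grid.take (m + 1)).reverse).length := by
            rw [List.length_zip]; omega
        _ ≤ m + 1 := by rw [List.length_reverse, List.length_take]; omega
        _ = step := hstep.symm
  | succ f ih =>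
    intro step hs
    have hstep : step ≤ m := by omega
    rw [chmOuterA]
    by_cases hbreak : grid.length ≤ m + step + 1
    · rw [if_pos]
      · rw [List.drop_eq_nil_of_le]
        · simp
        · calc (((grid.take (m + 1)).reverse).zip (grid.drop (m + 1))).length
              ≤ (grid.drop (m + 1)).length := by rw [List.length_zip]; omega
            _ ≤ step := by simp [List.length_drop]; omega
      · right; omega
    · have hin : m + step + 1 < grid.length := by omega
      rw [if_neg (by omega)]
      have h1 : (m : Int) - step = ((m - step : Nat) : Int) := by omega
      have h2 : (m : Int) + step + 1 = ((m + step + 1 : Nat) : Int) := by omega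
      rw [h1, h2, PySem.List.pyGet?_natCast, PySem.List.pyGet?_natCast,
          List.getElem?_eq_getElem (by omega : m - step < grid.length),
          List.getElem?_eq_getElem hin]
      simp only [Option.getD_some]
      -- the pair condition from Pre_
      have hp := hPre step (by omega) (by exact_mod_cast Int.ofNat_le.mpr hstep) (by omega)
      rw [h1, h2] at hp
      simp only [Int.toNat_natCast] at hp
      rw [List.getD_eq_getElem grid "" (by omega : m - step < grid.length),
          List.getD_eq_getElem grid "" hin] at hp
      have hsw : chmInnerA (grid[m - step]'(by omega)).toList (grid[m + step + 1]'hin).toList 0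
          = ((grid[m - step]'(by omega)) == (grid[m + step + 1]'hin)) := by
        rw [chmInnerA_eq_decide _ _ hp, Bool.eq_iff_iff, decide_eq_true_iff, beq_iff_eq]
        constructor
        · intro hc; exact String.toList_inj.mp hc
        · intro hc; rw [hc]
      simp only [hsw]
      -- peel one pair off the zip
      have htop : ((grid.take (m + 1)).reverse).length = m + 1 := by
        simp [List.length_take]; omega
      have hzlen : step < (((grid.take (m + 1)).reverse).zip (grid.drop (m + 1))).length := by
        rw [List.length_zip, htop, List.length_drop]; omega
      rw [List.drop_eq_getElem_cons hzlen, List.all_cons, List.getElem_zip]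
      have htops : ((grid.take (m + 1)).reverse)[step]'(by omega) = grid[m - step]'(by omega) := by
        rw [List.getElem_reverse]
        rw [List.getElem_take]
        congr 1
        rw [List.length_take]
        omega
      have hbots : (grid.drop (m + 1))[step]'(by rw [List.length_drop]; omega)
          = grid[m + step + 1]'hin := by
        rw [List.getElem_drop]
        congr 1
        omega
      rw [htops, hbots, ih (step + 1) (by omega)]
      cases ((grid[m - step]'(by omega)) == (grid[m + step + 1]'hin)) <;> simp

-- all-pairs-equal over a zip, as a pointwise statement
theorem zip_all_iff (t b : List String) :
    ((t.zip b).all (fun p => p.1 == p.2) = true) ↔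
      ∀ (i : Nat) (h1 : i < t.length) (h2 : i < b.length), t[i] = b[i] := by
  rw [List.all_eq_true]
  constructor
  · intro H i h1 h2
    have hm : i < (t.zip b).length := by rw [List.length_zip]; omega
    have := H (t.zip b)[i] (List.getElem_mem hm)
    rwa [List.getElem_zip, beq_iff_eq] at this
  · intro H p hp
    obtain ⟨i, hi, rfl⟩ := List.mem_iff_getElem.mp hp
    rw [List.getElem_zip, beq_iff_eq]
    exact H i (by rw [List.length_zip] at hi; omega) (by rw [List.length_zip] at hi; omega)

-- B's palindrome test of the reflection window equals pairwise equality along the zipped halves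
theorem window_palindrome_eq_zip (grid : List String) (m : Nat) :
    check_horizontal_middle_alt grid (m : Int) =
      (((grid.take (m + 1)).reverse).zip (grid.drop (m + 1))).all (fun p => p.1 == p.2) := by
  have hgc : ∀ (a b : Nat) (ha : a < grid.length) (hb : b < grid.length), a = b →
      grid[a]'ha = grid[b]'hb := by
    intro a b ha hb h; subst h; rfl
  simp only [check_horizontal_middle_alt]
  rw [if_neg (by omega)]
  by_cases hL : grid.length ≤ m + 1
  · have hb : grid.drop (m + 1) = [] := List.drop_eq_nil_of_le (by omega)
    rw [hb, List.zip_nil_right]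
    have hk : min ((m : Int) + 1) ((grid.length : Int) - m - 1)
        = (grid.length : Int) - m - 1 := by omega
    rw [hk, PySem.List.slice_toNat grid (by omega) (by omega)]
    rw [List.drop_eq_nil_of_le (by omega)]
    simp
  · -- L ≥ m + 2; the window is nonempty with half-width kn
    have hL' : m + 2 ≤ grid.length := by omega
    set kn : Nat := min (m + 1) (grid.length - m - 1) with hkn
    have hkn1 : 1 ≤ kn := by omega
    have hknm : kn ≤ m + 1 := by omega
    have hknL : kn ≤ grid.length - m - 1 := by omega
    have hk : min ((m : Int) + 1) ((grid.length : Int) - m - 1) = (kn : Int) := by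
      rw [hkn]
      rcases Nat.le_total (m + 1) (grid.length - m - 1) with hc | hc
      · rw [Nat.min_eq_left hc,
            min_eq_left (by omega : (m : Int) + 1 ≤ (grid.length : Int) - m - 1)]
        omega
      · rw [Nat.min_eq_right hc,
            min_eq_right (by omega : (grid.length : Int) - m - 1 ≤ (m : Int) + 1)]
        omega
    rw [hk, PySem.List.slice_toNat grid (by omega) (by omega)]
    have hlo : ((m : Int) + 1 - kn).toNat = m + 1 - kn := by omega
    have hhi : ((m : Int) + 1 + kn).toNat = m + 1 + kn := by omega
    rw [hlo, hhi]
    have h2k : (m + 1 + kn) - (m + 1 - kn) = kn + kn := by omega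
    rw [h2k]
    -- split the window into upper half u and lower half v
    have hw : (grid.drop (m + 1 - kn)).take (kn + kn)
        = (grid.drop (m + 1 - kn)).take kn ++ (grid.drop (m + 1)).take kn := by
      have hd : (m + 1 - kn) + kn = m + 1 := by omega
      rw [List.take_add, List.drop_drop, hd]
    rw [hw]
    set u := (grid.drop (m + 1 - kn)).take kn with hu
    set v := (grid.drop (m + 1)).take kn with hv
    have hul : u.length = kn := by simp [hu]; omega
    have hvl : v.length = kn := by simp [hv]; omega
    set t := (grid.take (m + 1)).reverse with htdef
    set b := grid.drop (m + 1) with hbdef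
    have htl : t.length = m + 1 := by simp [htdef]; omega
    have hbl : b.length = grid.length - m - 1 := by rw [hbdef, List.length_drop]; omega
    -- index formulas
    have hui : ∀ (i : Nat) (h : i < u.length), u[i] = grid[(m + 1 - kn) + i]'(by omega) := by
      intro i h
      simp only [hu, List.getElem_take, List.getElem_drop]
    have hti : ∀ (i : Nat) (h : i < t.length), t[i] = grid[m - i]'(by omega) := by
      intro i h
      have hil : i < m + 1 := by omega
      simp only [htdef, List.getElem_reverse, List.getElem_take]
      apply hgc
      rw [List.length_take]
      omega
    have hbi : ∀ (i : Nat) (h : i < b.length), b[i] = grid[(m + 1) + i]'(by omega) := by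
      intro i h
      simp only [hbdef, List.getElem_drop]
    have hvi : ∀ (i : Nat) (h : i < v.length), v[i] = grid[(m + 1) + i]'(by omega) := by
      intro i h
      simp only [hv, List.getElem_take]
      exact hbi i (by rw [hbl]; omega)
    rw [Bool.eq_iff_iff, beq_iff_eq, zip_all_iff]
    rw [List.reverse_append]
    constructor
    · intro heq i h1 h2
      have hik : i < kn := by omega
      have huv : u = v.reverse := (List.append_inj heq (by simp [hul, hvl])).1
      have := congrArg (fun l => l[kn - 1 - i]?) huv
      simp only [List.getElem?_eq_getElem (by omega : kn - 1 - i < u.length),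
        List.getElem?_eq_getElem (by rw [List.length_reverse]; omega : kn - 1 - i < v.reverse.length),
        Option.some_inj] at this
      rw [hui _ _, List.getElem_reverse, hvi _ _] at this
      rw [hti i h1, hbi i h2]
      refine Eq.trans (Eq.trans (hgc _ _ _ _ (by omega)) this) (hgc _ _ _ _ (by omega))
    · intro H
      have huv : u = v.reverse := by
        apply List.ext_getElem (by rw [hul, List.length_reverse, hvl])
        intro i hiu hiv
        have hik : i < kn := by omega
        rw [hui i hiu, List.getElem_reverse, hvi _ _]
        have := H (kn - 1 - i) (by omega) (by omega)
        rw [hti _ _, hbi _ _] at this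
        refine Eq.trans (Eq.trans (hgc _ _ _ _ (by omega)) this) (hgc _ _ _ _ (by omega))
      rw [huv, List.reverse_reverse]

-- ===== VERDICT (by name: the statement is the Claim_ definition above) =====
theorem check_horizontal_middle_spec : Claim_equal_check_horizontal_middle := by
  intro grid middle _hDom hPre
  unfold Spec_check_horizontal_middle
  by_cases hm : 0 ≤ middle
  · obtain ⟨m, rfl⟩ : ∃ m : Nat, middle = (m : Int) := ⟨middle.toNat, (Int.toNat_of_nonneg hm).symm⟩
    unfold check_horizontal_middle
    have ht : ((m : Int) + 1).toNat = m + 1 := by omega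
    rw [ht, outer_eq_zip grid m hPre (m + 1) 0 (by omega), List.drop_zero,
        window_palindrome_eq_zip]
  · unfold check_horizontal_middle check_horizontal_middle_alt
    have h0 : (middle + 1).toNat = 0 := by omega
    rw [h0, chmOuterA, if_pos (by omega)]
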